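-- pv_equiv track=rewrite | github.com/ariuk44/retake_exam_prep | day_27.py | hasKSmallFactors
-- ===== SOURCE A (Python) =====
-- def hasKSmallFactors(k, n):
--     if n <= 0 or k <= 0:
--         return False
--     for i in range(1, n + 1):
--         if n % i == 0:
--             u = i
--             v = n // i
--             if u < k and v < k:
--                 return True
--     return False
-- ===== SOURCE B (Python) =====
-- def hasKSmallFactors(k, n):
--     if n <= 0 or k <= 0:
--         return False
--     i = 1
--     while i * i <= n:
--         if n % i == 0 and i < k and n // i < k:
--             return True
--         i += 1
--     return False
-- ===== Notes on version B (the rewrite author's own statement) =====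
-- stated objective: faster
-- what changed: Instead of scanning every candidate divisor up to n, B scans only i with i*i <= n and checks both members (i, n//i) of each factor pair at once.
import Mathlib
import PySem

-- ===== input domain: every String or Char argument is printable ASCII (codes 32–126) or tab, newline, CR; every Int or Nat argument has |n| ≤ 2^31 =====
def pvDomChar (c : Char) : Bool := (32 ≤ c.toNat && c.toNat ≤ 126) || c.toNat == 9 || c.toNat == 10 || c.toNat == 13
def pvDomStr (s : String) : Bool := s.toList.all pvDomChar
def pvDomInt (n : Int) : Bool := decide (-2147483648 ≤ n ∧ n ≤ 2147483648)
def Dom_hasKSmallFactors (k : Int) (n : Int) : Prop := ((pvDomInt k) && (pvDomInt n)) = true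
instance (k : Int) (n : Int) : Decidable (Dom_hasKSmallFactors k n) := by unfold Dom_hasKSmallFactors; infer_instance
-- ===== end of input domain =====

-- B replaces A's O(n) scan of all candidate divisors with an O(sqrt n) scan of i with i*i ≤ n,
-- checking both members (i, n // i) of each factor pair at once.

-- ===== PORT A =====
-- for i in range(1, n + 1): if n % i == 0 and i < k and n // i < k: return True
def hasKSmallFactors (k : Int) (n : Int) : Bool :=
  if n ≤ 0 ∨ k ≤ 0 then false
  else (PySem.List.pyRange 1 (n + 1) 1).any (fun i =>
    PySem.Int.mod n i == 0 && (decide (i < k) && decide (PySem.Int.floordiv n i < k)))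

-- ===== PORT B =====
-- while i * i <= n: if n % i == 0 and i < k and n // i < k: return True; i += 1
def altLoop (k : Int) (n : Int) (i : Int) : Bool :=
  if h : i * i ≤ n then
    if PySem.Int.mod n i == 0 && (decide (i < k) && decide (PySem.Int.floordiv n i < k)) then
      true
    else altLoop k n (i + 1)
  else false
termination_by (n + 1 - i).toNat
decreasing_by
  have hin : i ≤ n := by nlinarith [sq_nonneg i, sq_nonneg (i - 1)]
  omega

def hasKSmallFactors_alt (k : Int) (n : Int) : Bool :=
  if n ≤ 0 ∨ k ≤ 0 then false
  else altLoop k n 1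

-- ===== PRECONDITION & SPEC =====
def Spec_hasKSmallFactors (k : Int) (n : Int) (out : Bool) : Prop := out = hasKSmallFactors_alt k n
instance (k : Int) (n : Int) (out : Bool) : Decidable (Spec_hasKSmallFactors k n out) := by unfold Spec_hasKSmallFactors; infer_instance

-- ===== CLAIM (what is proved, stated in full; the proofs are below) =====
def Claim_equal_hasKSmallFactors : Prop := ∀ (k : Int) (n : Int), Dom_hasKSmallFactors k n → Spec_hasKSmallFactors k n (hasKSmallFactors k n)

-- ===== LEMMAS AND PROOFS =====

-- the shared divisor test, as a proposition (valid for 0 < i)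
lemma cond_iff (k n i : Int) (hi : 0 < i) :
    (PySem.Int.mod n i == 0 && (decide (i < k) && decide (PySem.Int.floordiv n i < k))) = true
      ↔ i ∣ n ∧ i < k ∧ n / i < k := by
  simp [PySem.Int.mod_eq_zero_iff_dvd, PySem.Int.floordiv_eq_ediv_of_pos hi]

-- A returns true iff some divisor in [1, n] passes the test
lemma portA_iff (k n : Int) (hn : 0 < n) (hk : 0 < k) :
    hasKSmallFactors k n = true ↔ ∃ i, 1 ≤ i ∧ i ≤ n ∧ (i ∣ n ∧ i < k ∧ n / i < k) := by
  unfold hasKSmallFactors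
  rw [if_neg (by omega)]
  rw [List.any_eq_true]
  constructor
  · rintro ⟨i, hmem, hc⟩
    rw [PySem.List.mem_pyRange_one] at hmem
    exact ⟨i, hmem.1, by omega, (cond_iff k n i (by omega)).1 hc⟩
  · rintro ⟨i, h1, h2, hc⟩
    exact ⟨i, PySem.List.mem_pyRange_one.2 ⟨h1, by omega⟩, (cond_iff k n i (by omega)).2 hc⟩

-- B's loop from a start ≥ 1 returns true iff some j ≥ start with j*j ≤ n passes the test
lemma altLoop_iff (k n i : Int) (hi : 1 ≤ i) :
    altLoop k n i = true ↔ ∃ j, i ≤ j ∧ j * j ≤ n ∧ (j ∣ n ∧ j < k ∧ n / j < k) := by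
  fun_induction altLoop k n i with
  | case1 i hle hc =>
    simp only [true_iff]
    exact ⟨i, le_refl i, hle, (cond_iff k n i (by omega)).1 hc⟩
  | case2 i hle hc ih =>
    rw [ih (by omega)]
    constructor
    · rintro ⟨j, hj, h2, h3⟩; exact ⟨j, by omega, h2, h3⟩
    · rintro ⟨j, hj, h2, h3⟩
      refine ⟨j, ?_, h2, h3⟩
      rcases eq_or_lt_of_le hj with heq | hlt
      · exfalso; exact hc ((cond_iff k n j (by omega)).2 h3 ▸ heq ▸ rfl)
      · omega
  | case3 i hgt =>
    simp only [Bool.false_eq_true, false_iff]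
    rintro ⟨j, hj, h2, _⟩
    exact hgt (le_trans (by nlinarith) h2)

-- a divisor pair test found anywhere in [1, n] can be found at some j with j*j ≤ n (and back)
lemma exists_small_iff (k n : Int) (hn : 0 < n) :
    (∃ i, 1 ≤ i ∧ i ≤ n ∧ (i ∣ n ∧ i < k ∧ n / i < k))
      ↔ ∃ j, 1 ≤ j ∧ j * j ≤ n ∧ (j ∣ n ∧ j < k ∧ n / j < k) := by
  constructor
  · rintro ⟨i, h1, h2, hdvd, hik, hvk⟩
    by_cases hsq : i * i ≤ n
    · exact ⟨i, h1, hsq, hdvd, hik, hvk⟩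
    · push Not at hsq
      have hmul : n / i * i = n := Int.ediv_mul_cancel hdvd
      have hj1 : (1 : Int) ≤ n / i := (Int.le_ediv_iff_mul_le (by omega : (0:Int) < i)).2 (by nlinarith)
      have hji : n / i < i := by nlinarith
      have hdvd' : n / i ∣ n := ⟨i, hmul.symm⟩
      have hq : n / (n / i) * (n / i) = n := Int.ediv_mul_cancel hdvd'
      have hqi : n / (n / i) = i := by
        have : n / (n / i) * (n / i) = i * (n / i) := by rw [hq]; linarith [hmul, mul_comm (n / i) i]
        exact mul_right_cancel₀ (by omega) this
      exact ⟨n / i, hj1, by nlinarith, hdvd', hvk, by omega⟩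
  · rintro ⟨j, h1, h2, h3⟩
    exact ⟨j, h1, le_trans (by nlinarith) h2, h3⟩

-- ===== VERDICT (by name: the statement is the Claim_ definition above) =====
theorem hasKSmallFactors_spec : Claim_equal_hasKSmallFactors := by
  intro k n _
  unfold Spec_hasKSmallFactors
  by_cases hguard : n ≤ 0 ∨ k ≤ 0
  · unfold hasKSmallFactors hasKSmallFactors_alt
    rw [if_pos hguard, if_pos hguard]
  · push Not at hguard
    obtain ⟨hn, hk⟩ := hguard
    rw [Bool.eq_iff_iff, portA_iff k n (by omega) (by omega)]
    have hB : hasKSmallFactors_alt k n = altLoop k n 1 := by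
      unfold hasKSmallFactors_alt; rw [if_neg (by omega)]
    rw [hB, altLoop_iff k n 1 (le_refl 1)]
    exact exists_small_iff k n (by omega)
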